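-- pv_equiv track=rewrite | github.com/djotaku/adventofcode | 2017/Day_04/Python/solution.py | check_passphrase
-- ===== SOURCE A (Python) =====
-- def check_passphrase(passphrase: str) -> bool:
--     """Return true if it's a valid passphrase."""
--     words = passphrase.split()
--     test_set = set()
--     for word in words:
--         test_set.add(word)
--     if len(test_set) == len(words):
--         return True
--     else:
--         return False
-- ===== SOURCE B (Python) =====
-- def check_passphrase(passphrase: str) -> bool:
--     """Return true if it's a valid passphrase."""
--     words = sorted(passphrase.split())
--     for prev, cur in zip(words, words[1:]):
--         if prev == cur:
--             return False
--     return True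
-- ===== Notes on version B (the rewrite author's own statement) =====
-- stated objective: alternative
-- what changed: Replaces A's build-a-set-and-compare-sizes duplicate detection with sorting the word list and scanning adjacent pairs for an equal neighbour, returning False at the first adjacent duplicate.
import Mathlib
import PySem

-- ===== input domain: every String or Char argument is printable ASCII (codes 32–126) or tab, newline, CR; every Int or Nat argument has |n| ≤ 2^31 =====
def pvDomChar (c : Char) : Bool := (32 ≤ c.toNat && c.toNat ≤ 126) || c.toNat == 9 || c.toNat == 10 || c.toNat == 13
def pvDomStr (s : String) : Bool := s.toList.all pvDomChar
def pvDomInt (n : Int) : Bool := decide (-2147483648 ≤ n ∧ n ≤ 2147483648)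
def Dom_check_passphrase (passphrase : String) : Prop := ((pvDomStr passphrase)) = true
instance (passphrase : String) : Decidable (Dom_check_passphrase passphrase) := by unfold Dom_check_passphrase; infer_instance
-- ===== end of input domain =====

-- B sorts the words and scans adjacent pairs for a duplicate instead of A's set-size comparison; same result, no speed claim.

-- ===== PORT A =====
def check_passphrase (passphrase : String) : Bool :=
  let words := PySem.Str.split₀ passphrase
  let test_set := words.foldl PySem.Set.add (PySem.Set.empty : PySem.Set String)
  if PySem.Set.len test_set = words.length then true else false

-- ===== PORT B =====
-- the 'for prev, cur in zip(words, words[1:])' loop of Source B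
def adjacentScan : List String → Bool
  | prev :: cur :: rest => if prev == cur then false else adjacentScan (cur :: rest)
  | _ => true

def check_passphrase_alt (passphrase : String) : Bool :=
  let words := PySem.List.sorted (PySem.Str.split₀ passphrase) (fun x => x) false
  adjacentScan words

-- ===== PRECONDITION & SPEC =====
def Spec_check_passphrase (passphrase : String) (out : Bool) : Prop := out = check_passphrase_alt passphrase
instance (passphrase : String) (out : Bool) : Decidable (Spec_check_passphrase passphrase out) := by unfold Spec_check_passphrase; infer_instance

-- ===== CLAIM (what is proved, stated in full; the proofs are below) =====
def Claim_equal_check_passphrase : Prop := ∀ (passphrase : String), Dom_check_passphrase passphrase → Spec_check_passphrase passphrase (check_passphrase passphrase)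

-- ===== LEMMAS AND PROOFS =====

lemma foldl_add_len_le (xs : List String) : ∀ s : PySem.Set String,
    (xs.foldl PySem.Set.add s).length ≤ s.length + xs.length := by
  induction xs with
  | nil => simp
  | cons x xs ih =>
    intro s
    simp only [List.foldl_cons]
    refine (ih _).trans ?_
    by_cases h : x ∈ s
    · have he : PySem.Set.add s x = s := by simp [PySem.Set.add, h]
      rw [he]
      simp only [List.length_cons]
      omega
    · have he : PySem.Set.add s x = s ++ [x] := by simp [PySem.Set.add, h]
      rw [he]
      simp only [List.length_append, List.length_cons, List.length_nil]
      omega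

lemma foldl_add_len (xs : List String) : ∀ s : PySem.Set String,
    ((xs.foldl PySem.Set.add s).length = s.length + xs.length ↔
      xs.Nodup ∧ ∀ x ∈ xs, x ∉ s) := by
  induction xs with
  | nil => simp
  | cons x xs ih =>
    intro s
    simp only [List.foldl_cons]
    by_cases h : x ∈ s
    · rw [show PySem.Set.add s x = s by simp [PySem.Set.add, h]]
      constructor
      · intro hl
        have hle := foldl_add_len_le xs s
        simp only [List.length_cons] at hl
        omega
      · rintro ⟨-, hall⟩
        exact absurd h (hall x (by simp))
    · rw [show PySem.Set.add s x = s ++ [x] by simp [PySem.Set.add, h]]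
      have hih := ih (s ++ [x])
      simp only [List.length_append, List.length_singleton] at hih
      rw [show s.length + (x :: xs).length = (s.length + 1) + xs.length by simp [Nat.add_assoc, Nat.add_comm 1], hih]
      simp only [List.nodup_cons, List.mem_cons, List.mem_append, List.mem_cons, List.not_mem_nil]
      constructor
      · rintro ⟨hnd, hall⟩
        refine ⟨⟨fun hx => hall x hx (Or.inr (Or.inl rfl)), hnd⟩, ?_⟩
        rintro y (rfl | hy)
        · exact h
        · exact fun hys => hall y hy (Or.inl hys)
      · rintro ⟨⟨hx, hnd⟩, hall⟩
        refine ⟨hnd, fun y hy => ?_⟩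
        rintro (hys | rfl | hnil)
        · exact hall y (Or.inr hy) hys
        · exact hx hy
        · exact hnil

lemma adjacentScan_iff (ws : List String) :
    adjacentScan ws = true ↔ ws.IsChain (fun a b => a ≠ b) := by
  induction ws with
  | nil => simp [adjacentScan]
  | cons a t ih =>
    cases t with
    | nil => simp [adjacentScan]
    | cons b t =>
      by_cases h : a = b
      · subst h; simp [adjacentScan]
      · simp only [adjacentScan, beq_iff_eq, if_neg h, ih, List.isChain_cons_cons]
        tauto

lemma chain_and {R S : String → String → Prop} : ∀ l : List String,
    l.IsChain R → l.IsChain S → l.IsChain (fun a b => R a b ∧ S a b) := by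
  intro l
  induction l with
  | nil => intro _ _; exact .nil
  | cons a t ih =>
    cases t with
    | nil => intro _ _; simp
    | cons b t =>
      intro hr hs
      rw [List.isChain_cons_cons] at hr hs ⊢
      exact ⟨⟨hr.1, hs.1⟩, ih hr.2 hs.2⟩

lemma alt_iff (passphrase : String) :
    check_passphrase_alt passphrase = true ↔ (PySem.Str.split₀ passphrase).Nodup := by
  unfold check_passphrase_alt
  rw [adjacentScan_iff]
  have hperm : (PySem.List.sorted (PySem.Str.split₀ passphrase) (fun x => x) false).Perm
      (PySem.Str.split₀ passphrase) := PySem.List.sorted_perm _ _ _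
  constructor
  · intro h2
    have h1 : (PySem.List.sorted (PySem.Str.split₀ passphrase) (fun x => x) false).Pairwise (· ≤ ·) :=
      PySem.List.sorted_pairwise _ _
    have hc := chain_and _ h1.isChain h2
    have hlt : (PySem.List.sorted (PySem.Str.split₀ passphrase) (fun x => x) false).IsChain (· < ·) :=
      hc.imp (fun a b h => lt_of_le_of_ne h.1 h.2)
    have hp := (List.isChain_iff_pairwise).mp hlt
    exact hperm.nodup_iff.mp (hp.imp (fun h => ne_of_lt h))
  · intro h
    exact (hperm.nodup_iff.mpr h).isChain

lemma a_iff (passphrase : String) :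
    check_passphrase passphrase = true ↔ (PySem.Str.split₀ passphrase).Nodup := by
  unfold check_passphrase
  simp only [PySem.Set.len, PySem.Set.empty, Nat.cast_inj]
  split_ifs with h
  · simp only [true_iff]
    exact ((foldl_add_len _ []).mp (by simpa using h)).1
  · simp only [false_iff]
    intro hnd
    exact h (by simpa using (foldl_add_len _ []).mpr ⟨hnd, by simp⟩)

-- ===== VERDICT =====
theorem check_passphrase_spec : Claim_equal_check_passphrase := by
  intro p _
  unfold Spec_check_passphrase
  rcases h : check_passphrase_alt p with _ | _
  · rcases h2 : check_passphrase p with _ | _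
    · rfl
    · exact absurd ((alt_iff p).mpr ((a_iff p).mp h2)) (by simp [h])
  · exact (a_iff p).mpr ((alt_iff p).mp h)
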